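-- pv_equiv track=rewrite | github.com/JadielTeofilo/General-Algorithms | src/interviewbit/arrays/balance_array.py | get_odd_suffix
-- ===== SOURCE A (Python) =====
-- from typing import List
--
-- def get_odd_suffix(numbers: List[int]) -> List[int]:
-- 	# 5 5 2 7 8
-- 	odd_suffix_sum: List[int] = [0] * len(numbers)
-- 	for index in range(len(numbers) -1, -1, -1):
-- 		if index != len(numbers) - 1:
-- 			odd_suffix_sum[index] = odd_suffix_sum[index+1]
-- 		if (index + 1) % 2 != 0:
-- 			odd_suffix_sum[index] += numbers[index]
-- 	return odd_suffix_sum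
-- ===== SOURCE B (Python) =====
-- from typing import List
--
-- def get_odd_suffix(numbers: List[int]) -> List[int]:
--     # Forward two-pass: total of the contributing (even 0-based index) elements,
--     # then result[i] = total - prefix_of_contributions_before_i.
--     total = 0
--     take = True
--     for x in numbers:
--         if take:
--             total += x
--         take = not take
--     result: List[int] = []
--     seen = 0
--     take = True
--     for x in numbers:
--         result.append(total - seen)
--         if take:
--             seen += x
--         take = not take
--     return result
-- ===== Notes on version B (the rewrite author's own statement) =====
-- stated objective: alternative
-- what changed: Replaces A's backward in-place suffix accumulation into a preallocated array with two forward passes: first compute the total of even-indexed elements, then emit total minus a running prefix of those contributions.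
import Mathlib
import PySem

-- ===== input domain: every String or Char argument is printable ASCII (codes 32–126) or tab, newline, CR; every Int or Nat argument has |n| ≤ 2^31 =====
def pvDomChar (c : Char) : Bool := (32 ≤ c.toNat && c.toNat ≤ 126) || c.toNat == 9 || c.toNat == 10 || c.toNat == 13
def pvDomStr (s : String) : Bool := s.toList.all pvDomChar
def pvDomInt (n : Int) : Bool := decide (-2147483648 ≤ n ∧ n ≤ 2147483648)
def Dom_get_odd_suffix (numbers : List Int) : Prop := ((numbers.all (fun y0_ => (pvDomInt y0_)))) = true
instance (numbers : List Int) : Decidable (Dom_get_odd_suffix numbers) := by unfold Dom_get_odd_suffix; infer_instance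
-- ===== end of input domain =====

-- B changes the decomposition: A fills an array backwards in place; B makes two forward
-- passes (total of the contributing elements, then total minus a running prefix).

-- ===== PORT A =====
-- loop body of A (one iteration over `index`)
def aStep (numbers : List Int) (acc : List Int) (index : Int) : List Int :=
  let acc := if index ≠ (numbers.length : Int) - 1 then
      acc.set index.toNat (PySem.List.pyGetD acc (index + 1) 0) else acc
  if PySem.Int.mod (index + 1) 2 ≠ 0 then
      acc.set index.toNat (PySem.List.pyGetD acc index 0 + PySem.List.pyGetD numbers index 0)
    else acc

def get_odd_suffix (numbers : List Int) : List Int :=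
  (PySem.List.pyRange ((numbers.length : Int) - 1) (-1) (-1)).foldl
    (aStep numbers) (List.replicate numbers.length 0)

-- ===== PORT B =====
-- first loop body of B: accumulate the total of contributing elements, toggling `take`
def bTotalStep (st : Int × Bool) (x : Int) : Int × Bool :=
  ((if st.2 then st.1 + x else st.1), !st.2)

-- second loop body of B: append total - seen, then update seen, toggling `take`
def bStep (total : Int) (st : List Int × Int × Bool) (x : Int) : List Int × Int × Bool :=
  (st.1 ++ [total - st.2.1], (if st.2.2 then st.2.1 + x else st.2.1), !st.2.2)

def get_odd_suffix_alt (numbers : List Int) : List Int :=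
  let total := (numbers.foldl bTotalStep (0, true)).1
  (numbers.foldl (bStep total) ([], 0, true)).1

-- ===== PRECONDITION & SPEC =====
def Spec_get_odd_suffix (numbers : List Int) (out : List Int) : Prop := out = get_odd_suffix_alt numbers
instance (numbers : List Int) (out : List Int) : Decidable (Spec_get_odd_suffix numbers out) := by unfold Spec_get_odd_suffix; infer_instance

-- ===== CLAIM (what is proved, stated in full; the proofs are below) =====
def Claim_equal_get_odd_suffix : Prop := ∀ (numbers : List Int), Dom_get_odd_suffix numbers → Spec_get_odd_suffix numbers (get_odd_suffix numbers)

-- ===== LEMMAS AND PROOFS =====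

-- reference: osuf xs b = (list of suffix sums of contributing elements, sum of the whole list's
-- contributing elements); b = true means the first element of xs sits at an even 0-based index
def osuf : List Int → Bool → (List Int × Int)
  | [], _ => ([], 0)
  | x :: xs, b =>
    let p := osuf xs (!b)
    let s' := if b then p.2 + x else p.2
    (s' :: p.1, s')

theorem osuf_head (x : Int) (xs : List Int) (b : Bool) :
    (osuf (x :: xs) b).1 = (osuf (x :: xs) b).2 :: (osuf xs (!b)).1 := by
  simp [osuf]

-- B: the first loop computes the total of contributing elements
theorem b_total : ∀ (xs : List Int) (b : Bool) (t : Int),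
    (xs.foldl bTotalStep (t, b)).1 = t + (osuf xs b).2 := by
  intro xs
  induction xs with
  | nil => intro b t; simp [osuf]
  | cons x xs ih =>
    intro b t
    cases b <;> (simp [bTotalStep, osuf, ih]; try ring)

-- B: the second loop emits total - seen, the suffix sum, while total = seen + (osuf xs b).2
theorem b_main (total : Int) : ∀ (xs : List Int) (b : Bool) (res : List Int) (seen : Int),
    total = seen + (osuf xs b).2 →
    (xs.foldl (bStep total) (res, seen, b)).1 = res ++ (osuf xs b).1 := by
  intro xs
  induction xs with
  | nil => intro b res seen _; simp [osuf]
  | cons x xs ih =>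
    intro b res seen h
    have h2 : total = (if b then seen + x else seen) + (osuf xs (!b)).2 := by
      cases b <;> simp [osuf] at h ⊢ <;> omega
    have hhead : total - seen = (osuf (x :: xs) b).2 := by
      cases b <;> simp [osuf] at h ⊢ <;> omega
    simp only [List.foldl_cons, bStep]
    rw [ih (!b) _ _ h2, osuf_head, hhead]
    simp

theorem alt_eq_osuf (numbers : List Int) : get_odd_suffix_alt numbers = (osuf numbers true).1 := by
  show (numbers.foldl (bStep ((numbers.foldl bTotalStep (0, true)).1)) ([], 0, true)).1 = _
  rw [b_total numbers true 0, b_main _ numbers true [] 0 rfl]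
  simp

-- A: one iteration of the backward loop at index k
theorem osuf_cons_true (x : Int) (xs : List Int) :
    osuf (x :: xs) true = (((osuf xs false).2 + x) :: (osuf xs false).1, (osuf xs false).2 + x) := rfl

theorem osuf_cons_false (x : Int) (xs : List Int) :
    osuf (x :: xs) false = ((osuf xs true).2 :: (osuf xs true).1, (osuf xs true).2) := rfl

theorem set_replicate_last (k : Nat) (v : Int) :
    (List.replicate (k+1) (0:Int)).set k v = List.replicate k 0 ++ [v] := by
  rw [List.replicate_succ', List.set_append_right _ _ (by simp)]
  simp

theorem getD_rep_cons (k : Nat) (s : Int) (t : List Int) :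
    PySem.List.pyGetD (List.replicate (k+1) 0 ++ s :: t) ((k : Int) + 1) 0 = s := by
  rw [show ((k : Int) + 1) = ((k + 1 : Nat) : Int) by push_cast; ring, PySem.List.pyGetD_natCast]
  simp [List.getD]

theorem getD_rep_mid (k : Nat) (v : Int) (l : List Int) :
    PySem.List.pyGetD ((List.replicate k 0 ++ [v]) ++ l) (k : Int) 0 = v := by
  rw [PySem.List.pyGetD_natCast]
  simp [List.getD]

theorem set_rep (k : Nat) (v : Int) (l : List Int) :
    (List.replicate (k+1) 0 ++ l).set k v = (List.replicate k 0 ++ [v]) ++ l := by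
  rw [List.set_append_left _ _ (by simp), set_replicate_last]

theorem set_rep_mid (k : Nat) (v w : Int) (l : List Int) :
    ((List.replicate k 0 ++ [v]) ++ l).set k w = (List.replicate k 0 ++ [w]) ++ l := by
  rw [List.set_append_left _ _ (by simp), List.set_append_right _ _ (by simp)]
  simp

theorem a_step_eq (numbers : List Int) (k : Nat) (hk : k < numbers.length) :
    aStep numbers
      (List.replicate (k+1) 0 ++ (osuf (numbers.drop (k+1)) (decide ((k+1) % 2 = 0))).1) (k : Int)
      = List.replicate k 0 ++ (osuf (numbers.drop k) (decide (k % 2 = 0))).1 := by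
  have hdrop : numbers.drop k = numbers[k] :: numbers.drop (k+1) := (List.getElem_cons_drop hk).symm
  have hmod : PySem.Int.mod ((k : Int) + 1) 2 = ((k : Int) + 1) % 2 :=
    PySem.Int.mod_eq_emod_of_pos (by norm_num)
  have hgetn : PySem.List.pyGetD numbers (k : Int) 0 = numbers[k] := by
    simp [PySem.List.pyGetD_natCast, List.getD, hk]
  by_cases hlast : k + 1 = numbers.length
  · -- last index: branch 1 is skipped, the suffix is empty
    have hnil : numbers.drop (k+1) = [] := by simp [hlast]
    have hcond1 : ¬ ((k : Int) ≠ (numbers.length : Int) - 1) := by simp; omega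
    rw [hdrop, hnil]
    simp only [aStep, hcond1, if_false, ite_not, hmod]
    rcases Nat.mod_two_eq_zero_or_one k with hp | hp
    · have hc2 : ¬ (((k : Int) + 1) % 2 = 0) := by omega
      have hb0 : decide (k % 2 = 0) = true := by simp [hp]
      simp only [hc2, if_false, hb0, Int.toNat_natCast]
      rw [show PySem.List.pyGetD (List.replicate (k+1) 0 ++ (osuf ([] : List Int) (decide ((k+1) % 2 = 0))).1) (k : Int) 0 = 0 by
        simp [osuf, PySem.List.pyGetD_natCast]]
      rw [hgetn]
      simp [osuf, set_replicate_last]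
    · have hc2 : (((k : Int) + 1) % 2 = 0) := by omega
      have hb0 : decide (k % 2 = 0) = false := by simp [hp]
      simp [hc2, hb0, osuf, List.replicate_succ']
  · -- interior index: the suffix is nonempty with head = its own suffix sum
    have hne : numbers.drop (k+1) ≠ [] := by simp [List.drop_eq_nil_iff]; omega
    obtain ⟨y, ys, hys⟩ := List.exists_cons_of_ne_nil hne
    have hcond1 : ((k : Int) ≠ (numbers.length : Int) - 1) := by simp; omega
    rw [hdrop, hys]
    rcases Nat.mod_two_eq_zero_or_one k with hp | hp
    · -- k even: branch 2 fires
      have hc2 : PySem.Int.mod ((k : Int) + 1) 2 ≠ 0 := by rw [hmod]; omega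
      have hb1 : decide ((k+1) % 2 = 0) = false := by simp; omega
      have hb0 : decide (k % 2 = 0) = true := by simp [hp]
      rw [hb1, hb0]
      simp only [aStep, if_pos hcond1, if_pos hc2, Int.toNat_natCast,
        osuf_cons_false, osuf_cons_true, getD_rep_cons, set_rep, getD_rep_mid, hgetn,
        set_rep_mid]
      simp
    · -- k odd: branch 2 is skipped
      have hc2 : ¬ (PySem.Int.mod ((k : Int) + 1) 2 ≠ 0) := by rw [hmod]; omega
      have hb1 : decide ((k+1) % 2 = 0) = true := by simp; omega
      have hb0 : decide (k % 2 = 0) = false := by simp [hp]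
      rw [hb1, hb0]
      simp only [aStep, if_pos hcond1, if_neg hc2, Int.toNat_natCast,
        osuf_cons_true, osuf_cons_false, getD_rep_cons, set_rep]
      simp

-- A: the backward fold maintains `replicate k 0 ++ suffix-results of drop k`
theorem a_inv (numbers : List Int) : ∀ (k : Nat), k ≤ numbers.length →
    (PySem.List.pyRange ((k : Int) - 1) (-1) (-1)).foldl (aStep numbers)
      (List.replicate k 0 ++ (osuf (numbers.drop k) (decide (k % 2 = 0))).1)
    = (osuf numbers true).1 := by
  intro k
  induction k with
  | zero =>
    intro _
    rw [PySem.List.pyRange_neg_one_eq_nil (by norm_num)]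
    simp
  | succ k ih =>
    intro h
    have hk : k < numbers.length := by omega
    have hrange : PySem.List.pyRange (((k+1 : Nat) : Int) - 1) (-1) (-1)
        = (k : Int) :: PySem.List.pyRange ((k : Int) - 1) (-1) (-1) := by
      rw [show (((k+1 : Nat) : Int) - 1) = (k : Int) by push_cast; ring]
      exact PySem.List.pyRange_neg_one_cons (by omega)
    rw [hrange, List.foldl_cons, a_step_eq numbers k hk, ih (by omega)]

theorem a_eq_osuf (numbers : List Int) : get_odd_suffix numbers = (osuf numbers true).1 := by
  have := a_inv numbers numbers.length le_rfl
  simp only [List.drop_length, osuf] at this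
  rw [get_odd_suffix]
  simpa using this

-- ===== VERDICT (by name: the statement is the Claim_ definition above) =====
theorem get_odd_suffix_spec : Claim_equal_get_odd_suffix := by
  intro numbers _
  unfold Spec_get_odd_suffix
  rw [a_eq_osuf, alt_eq_osuf]
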